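-- pv_equiv track=rewrite | github.com/gvellut/piqopiqo | src/piqopiqo/main_window.py | _pick_filter_fallback_target_path
-- ===== SOURCE A (Python) =====
-- def _pick_filter_fallback_target_path(
--
--     previous_visible_paths: list[str],
--     old_photo_list_paths: list[str],
--     new_photo_list_paths: list[str],
-- ) -> str | None:
--     """Pick a fallback target near the previous viewport when filter removes it."""
--     if not previous_visible_paths or not new_photo_list_paths:
--         return None
--
--     old_index_by_path = {path: i for i, path in enumerate(old_photo_list_paths)}
--     previous_indices = [
--         old_index_by_path[path]
--         for path in previous_visible_paths
--         if path in old_index_by_path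
--     ]
--     if not previous_indices:
--         return None
--
--     best_path = None
--     best_distance = None
--     best_old_index = None
--     for path in new_photo_list_paths:
--         old_index = old_index_by_path.get(path)
--         if old_index is None:
--             continue
--         distance = min(abs(old_index - prev_idx) for prev_idx in previous_indices)
--         if (
--             best_distance is None
--             or distance < best_distance
--             or (distance == best_distance and old_index < best_old_index)
--         ):
--             best_path = path
--             best_distance = distance
--             best_old_index = old_index
--     return best_path
-- ===== SOURCE B (Python) =====
-- def _pick_filter_fallback_target_path(
--     previous_visible_paths: list[str],
--     old_photo_list_paths: list[str],
--     new_photo_list_paths: list[str],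
-- ) -> str | None:
--     """Pick a fallback target near the previous viewport when filter removes it.
--
--     Sorts the previous viewport indices once and binary-searches the nearest
--     one for each candidate, instead of scanning all previous indices per path.
--     """
--     if not previous_visible_paths or not new_photo_list_paths:
--         return None
--
--     old_index_by_path = {path: i for i, path in enumerate(old_photo_list_paths)}
--     prev_sorted = sorted(
--         old_index_by_path[path]
--         for path in previous_visible_paths
--         if path in old_index_by_path
--     )
--     if not prev_sorted:
--         return None
--
--     n = len(prev_sorted)
--     best = None  # ((distance, old_index), path)
--     for path in new_photo_list_paths:
--         old_index = old_index_by_path.get(path)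
--         if old_index is None:
--             continue
--         # insertion point of old_index in prev_sorted (hand-rolled bisect_left)
--         lo, hi = 0, n
--         while lo < hi:
--             mid = (lo + hi) // 2
--             if prev_sorted[mid] < old_index:
--                 lo = mid + 1
--             else:
--                 hi = mid
--         if lo < n:
--             distance = prev_sorted[lo] - old_index
--             if lo > 0:
--                 distance = min(distance, old_index - prev_sorted[lo - 1])
--         else:
--             distance = old_index - prev_sorted[lo - 1]
--         key = (distance, old_index)
--         if best is None or key < best[0]:
--             best = (key, path)
--     return best[1] if best is not None else None
-- ===== Notes on version B (the rewrite author's own statement) =====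
-- stated objective: faster
-- what changed: Instead of scanning all previous viewport indices for every candidate path (O(N*M)), B sorts the previous indices once and binary-searches the nearest one per candidate, picking the best (distance, old_index) key in one pass.
import Mathlib
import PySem

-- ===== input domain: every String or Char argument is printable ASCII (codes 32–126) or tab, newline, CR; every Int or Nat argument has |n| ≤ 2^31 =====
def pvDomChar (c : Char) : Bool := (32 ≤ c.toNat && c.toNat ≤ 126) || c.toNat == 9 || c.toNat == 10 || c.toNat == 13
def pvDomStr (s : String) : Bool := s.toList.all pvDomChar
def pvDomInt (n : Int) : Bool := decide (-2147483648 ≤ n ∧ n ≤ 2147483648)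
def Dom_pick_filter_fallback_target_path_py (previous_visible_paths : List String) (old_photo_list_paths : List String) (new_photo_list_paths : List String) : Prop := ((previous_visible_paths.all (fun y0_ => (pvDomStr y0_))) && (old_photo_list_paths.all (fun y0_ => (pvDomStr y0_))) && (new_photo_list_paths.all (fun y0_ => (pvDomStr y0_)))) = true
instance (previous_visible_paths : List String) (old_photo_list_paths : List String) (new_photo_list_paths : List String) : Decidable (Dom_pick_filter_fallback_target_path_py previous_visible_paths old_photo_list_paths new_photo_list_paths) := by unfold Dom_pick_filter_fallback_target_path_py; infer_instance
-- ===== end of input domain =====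

-- B replaces A's per-candidate scan over all previous viewport indices with a
-- one-time sort plus binary search for the nearest index (measured faster).



-- ===== PORT A =====
-- literal port of A: dict comprehension, previous_indices list, then a linear
-- scan where each candidate's distance is min over ALL previous indices.
def pick_filter_fallback_target_path_py (previous_visible_paths : List String) (old_photo_list_paths : List String) (new_photo_list_paths : List String) : Option String :=
  if previous_visible_paths = [] ∨ new_photo_list_paths = [] then none
  else
    let old_index_by_path : PySem.Dict String Int :=
      (PySem.List.enumerate old_photo_list_paths 0).foldl (fun d ip => d.insert ip.2 ip.1) PySem.Dict.empty
    let previous_indices : List Int :=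
      (previous_visible_paths.filter (fun p => old_index_by_path.contains p)).map
        (fun p => (old_index_by_path.get? p).getD 0)  -- key present by the filter; exact
    if previous_indices = [] then none
    else
      let st := new_photo_list_paths.foldl
        (fun (st : Option String × Option Int × Option Int) path =>
          match old_index_by_path.get? path with
          | none => st
          | some old_index =>
            -- min over a nonempty generator (previous_indices ≠ []); exact
            let distance := (PySem.List.min? (previous_indices.map (fun q => |old_index - q|)) (fun y => y)).getD 0
            match st with
            | (_, none, _) => (some path, some distance, some old_index)
            | (bp, some bd, bio) =>
              if distance < bd ∨ (distance = bd ∧ old_index < bio.getD 0) then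
                (some path, some distance, some old_index)
              else (bp, some bd, bio))
        (none, none, none)
      st.1

-- ===== PORT B =====
-- Source B's hand-rolled bisect_left loop (while lo < hi), as recursion on hi - lo;
-- indices are always in range, so getD's default is never read (exact).
def pvBisect (s : List Int) (x : Int) (lo hi : Nat) : Nat :=
  if lo < hi then
    let mid := (lo + hi) / 2
    if s.getD mid 0 < x then pvBisect s x (mid + 1) hi
    else pvBisect s x lo mid
  else lo
termination_by hi - lo
decreasing_by all_goals omega

-- port of B: sort the previous indices once, binary-search the nearest per
-- candidate, keep the best ((distance, old_index), path).
def pick_filter_fallback_target_path_py_alt (previous_visible_paths : List String) (old_photo_list_paths : List String) (new_photo_list_paths : List String) : Option String :=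
  if previous_visible_paths = [] ∨ new_photo_list_paths = [] then none
  else
    let old_index_by_path : PySem.Dict String Int :=
      (PySem.List.enumerate old_photo_list_paths 0).foldl (fun d ip => d.insert ip.2 ip.1) PySem.Dict.empty
    let prev_sorted : List Int :=
      PySem.List.sorted ((previous_visible_paths.filter (fun p => old_index_by_path.contains p)).map
        (fun p => (old_index_by_path.get? p).getD 0)) (fun x => x) false
    if prev_sorted = [] then none
    else
      let n := prev_sorted.length
      let best := new_photo_list_paths.foldl
        (fun (best : Option ((Int × Int) × String)) path =>
          match old_index_by_path.get? path with
          | none => best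
          | some old_index =>
            let lo := pvBisect prev_sorted old_index 0 n
            let distance :=
              if lo < n then
                let d0 := prev_sorted.getD lo 0 - old_index
                if 0 < lo then min d0 (old_index - prev_sorted.getD (lo - 1) 0) else d0
              else old_index - prev_sorted.getD (lo - 1) 0
            -- Python tuple comparison key < best[0] is lexicographic; exact
            match best with
            | none => some ((distance, old_index), path)
            | some (bk, bp) =>
              if distance < bk.1 ∨ (distance = bk.1 ∧ old_index < bk.2) then
                some ((distance, old_index), path)
              else some (bk, bp))
        none
      best.map (fun kp => kp.2)

-- ===== PRECONDITION & SPEC =====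
def Spec_pick_filter_fallback_target_path_py (previous_visible_paths : List String) (old_photo_list_paths : List String) (new_photo_list_paths : List String) (out : Option String) : Prop := out = pick_filter_fallback_target_path_py_alt previous_visible_paths old_photo_list_paths new_photo_list_paths
instance (previous_visible_paths : List String) (old_photo_list_paths : List String) (new_photo_list_paths : List String) (out : Option String) : Decidable (Spec_pick_filter_fallback_target_path_py previous_visible_paths old_photo_list_paths new_photo_list_paths out) := by unfold Spec_pick_filter_fallback_target_path_py; infer_instance

-- ===== CLAIM (what is proved, stated in full; the proofs are below) =====
def Claim_equal_pick_filter_fallback_target_path_py : Prop := ∀ (previous_visible_paths : List String) (old_photo_list_paths : List String) (new_photo_list_paths : List String), Dom_pick_filter_fallback_target_path_py previous_visible_paths old_photo_list_paths new_photo_list_paths → Spec_pick_filter_fallback_target_path_py previous_visible_paths old_photo_list_paths new_photo_list_paths (pick_filter_fallback_target_path_py previous_visible_paths old_photo_list_paths new_photo_list_paths)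


-- ===== LEMMAS AND PROOFS =====

theorem pvBisect_spec (s : List Int) (x : Int) : ∀ (lo hi : Nat),
    lo ≤ hi → hi ≤ s.length → s.Pairwise (· ≤ ·) →
    (∀ k (h : k < s.length), k < lo → s[k] < x) →
    (∀ k (h : k < s.length), hi ≤ k → x ≤ s[k]) →
    lo ≤ pvBisect s x lo hi ∧ pvBisect s x lo hi ≤ hi ∧
    (∀ k (h : k < s.length), k < pvBisect s x lo hi → s[k] < x) ∧
    (∀ k (h : k < s.length), pvBisect s x lo hi ≤ k → x ≤ s[k]) := by
  intro lo hi
  induction lo, hi using pvBisect.induct s x with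
  | case1 lo hi hlt mid hmidlt ih =>
    intro _ hhn hs hlow hhigh
    rw [pvBisect]
    simp only [if_pos hlt, if_pos (show s.getD ((lo + hi) / 2) 0 < x from hmidlt)]
    have hmlo : lo ≤ mid := by omega
    have hmhi : mid < hi := by omega
    have hmlen : mid < s.length := by omega
    have mono := List.pairwise_iff_getElem.mp hs
    have hnew : ∀ k (h : k < s.length), k < mid + 1 → s[k] < x := by
      intro k hk hkm
      rcases Nat.lt_or_ge k mid with h | h
      · exact lt_of_le_of_lt (mono k mid hk hmlen h) (by
          rwa [List.getD_eq_getElem s 0 hmlen] at hmidlt)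
      · have : k = mid := by omega
        subst this
        rwa [List.getD_eq_getElem s 0 hk] at hmidlt
    have h := ih (by omega) hhn hs hnew hhigh
    exact ⟨le_trans (show lo ≤ mid + 1 by omega) h.1, h.2.1, h.2.2.1, h.2.2.2⟩
  | case2 lo hi hlt mid hmidge ih =>
    intro _ hhn hs hlow hhigh
    rw [pvBisect]
    simp only [if_pos hlt, if_neg (show ¬ s.getD ((lo + hi) / 2) 0 < x from hmidge)]
    have hmlo : lo ≤ mid := by omega
    have hmhi : mid < hi := by omega
    have hmlen : mid < s.length := by omega
    have mono := List.pairwise_iff_getElem.mp hs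
    have hnew : ∀ k (h : k < s.length), mid ≤ k → x ≤ s[k] := by
      intro k hk hkm
      rcases Nat.lt_or_ge k mid with h | h
      · omega
      · rcases Nat.eq_or_lt_of_le h with h' | h'
        · subst h'
          rw [List.getD_eq_getElem s 0 hk] at hmidge
          omega
        · refine le_trans ?_ (mono mid k hmlen hk h')
          rw [List.getD_eq_getElem s 0 hmlen] at hmidge
          omega
    have h := ih hmlo (by omega) hs hlow hnew
    exact ⟨h.1, le_trans h.2.1 (show mid ≤ hi by omega), h.2.2.1, h.2.2.2⟩
  | case3 lo hi hnlt =>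
    intro hle hhn hs hlow hhigh
    rw [pvBisect]
    simp only [if_neg hnlt]
    exact ⟨le_refl _, hle, hlow, fun k hk hkk => hhigh k hk (by omega)⟩

theorem pvMin_getD_eq (L : List Int) (m : Int) (hm : m ∈ L) (hlb : ∀ y ∈ L, m ≤ y) :
    (PySem.List.min? L (fun y => y)).getD 0 = m := by
  cases hL : PySem.List.min? L (fun y => y) with
  | none =>
    rw [PySem.List.min?_eq_none_iff] at hL
    subst hL; simp at hm
  | some m0 =>
    have h1 : m0 ∈ L := PySem.List.min?_mem hL
    have h2 := PySem.List.min?_isMin hL m hm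
    simpa using le_antisymm h2 (hlb m0 h1)

theorem pvDist_eq (P : List Int) (hP : P ≠ []) (x : Int) :
    (let s := PySem.List.sorted P (fun y => y) false
     let n := s.length
     let lo := pvBisect s x 0 n
     if lo < n then
       let d0 := s.getD lo 0 - x
       if 0 < lo then min d0 (x - s.getD (lo - 1) 0) else d0
     else x - s.getD (lo - 1) 0)
    = (PySem.List.min? (P.map (fun q => |x - q|)) (fun y => y)).getD 0 := by
  simp only []
  set s := PySem.List.sorted P (fun y => y) false with hsdef
  have hperm : s.Perm P := PySem.List.sorted_perm ..
  have hpw : s.Pairwise (· ≤ ·) := PySem.List.sorted_pairwise ..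
  have hslen : 0 < s.length := by
    rcases Nat.eq_zero_or_pos s.length with h | h
    · have hs0 : s = [] := List.eq_nil_of_length_eq_zero h
      exact absurd ((hs0 ▸ hperm).symm.eq_nil) hP
    · exact h
  set r := pvBisect s x 0 s.length with hrdef
  have hspec := pvBisect_spec s x 0 s.length (by omega) (le_refl _) hpw
    (fun k hk h => absurd h (Nat.not_lt_zero k))
    (fun k hk h => absurd hk (by omega))
  obtain ⟨-, hrn, hL, hH⟩ := hspec
  have mono := List.pairwise_iff_getElem.mp hpw
  have habs1 : ∀ p : ℤ, x ≤ p → |x - p| = p - x := fun p hp => by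
    rw [abs_sub_comm, abs_of_nonneg (by omega)]
  have habs2 : ∀ p : ℤ, p < x → |x - p| = x - p := fun p hp => by
    rw [abs_of_nonneg (by omega)]
  have hmemL : ∀ (k : Nat) (hk : k < s.length),
      |x - s[k]| ∈ P.map (fun q => |x - q|) := fun k hk =>
    List.mem_map_of_mem (hperm.subset (s.getElem_mem hk))
  have hlbgen : ∀ m : ℤ, (∀ (k : Nat) (hk : k < s.length), m ≤ |x - s[k]|) →
      ∀ y ∈ P.map (fun q => |x - q|), m ≤ y := by
    intro m hm y hy
    rcases List.mem_map.mp hy with ⟨q, hq, rfl⟩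
    rcases List.mem_iff_getElem.mp (hperm.mem_iff.mpr hq) with ⟨k, hk, rfl⟩
    exact hm k hk
  by_cases hr : r < s.length
  · rw [if_pos hr]
    have hxr : x ≤ s[r] := hH r hr (le_refl r)
    rw [List.getD_eq_getElem s 0 hr]
    by_cases hr0 : 0 < r
    · rw [if_pos hr0]
      have hr1 : r - 1 < s.length := by omega
      have hs1 : s[r-1] < x := hL (r-1) hr1 (by omega)
      rw [List.getD_eq_getElem s 0 hr1]
      refine (pvMin_getD_eq _ _ ?_ ?_).symm
      · rcases min_cases (s[r] - x) (x - s[r-1]) with ⟨he, -⟩ | ⟨he, -⟩ <;> rw [he]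
        · have := hmemL r hr; rwa [habs1 _ hxr] at this
        · have := hmemL (r-1) hr1; rwa [habs2 _ hs1] at this
      · refine hlbgen _ ?_
        intro k hk
        rcases Nat.lt_or_ge k r with h | h
        · rw [habs2 _ (hL k hk h)]
          have : s[k] ≤ s[r-1] := by
            rcases Nat.lt_or_ge k (r-1) with h' | h'
            · exact mono k (r-1) hk hr1 h'
            · have : k = r - 1 := by omega
              subst this; exact le_refl _
          have hmin := min_le_right (s[r] - x) (x - s[r-1])
          omega
        · rw [habs1 _ (hH k hk h)]
          have : s[r] ≤ s[k] := by
            rcases Nat.lt_or_ge r k with h' | h'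
            · exact mono r k hr hk h'
            · have : k = r := by omega
              subst this; exact le_refl _
          have hmin := min_le_left (s[r] - x) (x - s[r-1])
          omega
    · rw [if_neg hr0]
      have hr0' : r = 0 := by omega
      refine (pvMin_getD_eq _ _ ?_ ?_).symm
      · have := hmemL r hr; rwa [habs1 _ hxr] at this
      · refine hlbgen _ ?_
        intro k hk
        have hxk : x ≤ s[k] := hH k hk (by omega)
        rw [habs1 _ hxk]
        have : s[r] ≤ s[k] := by
          rcases Nat.lt_or_ge r k with h' | h'
          · exact mono r k hr hk h'
          · have : k = r := by omega
            subst this; exact le_refl _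
        omega
  · rw [if_neg hr]
    have hrn' : r = s.length := by omega
    have hr1 : r - 1 < s.length := by omega
    have hs1 : s[r-1] < x := hL (r-1) hr1 (by omega)
    rw [List.getD_eq_getElem s 0 hr1]
    refine (pvMin_getD_eq _ _ ?_ ?_).symm
    · have := hmemL (r-1) hr1; rwa [habs2 _ hs1] at this
    · refine hlbgen _ ?_
      intro k hk
      have hkx : s[k] < x := hL k hk (by omega)
      rw [habs2 _ hkx]
      have : s[k] ≤ s[r-1] := by
        rcases Nat.lt_or_ge k (r-1) with h' | h'
        · exact mono k (r-1) hk hr1 h'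
        · have : k = r - 1 := by omega
          subst this; exact le_refl _
      omega

def pvRel (a : Option String × Option Int × Option Int) (b : Option ((Int × Int) × String)) : Prop :=
  (a = (none, none, none) ∧ b = none) ∨
  ∃ p dd ii, a = (some p, some dd, some ii) ∧ b = some ((dd, ii), p)

theorem pvFoldl_rel {α β γ : Type} (R : β → γ → Prop) (f : β → α → β) (g : γ → α → γ)
    (hstep : ∀ b c a, R b c → R (f b a) (g c a)) :
    ∀ (l : List α) (b : β) (c : γ), R b c → R (l.foldl f b) (l.foldl g c) := by
  intro l
  induction l with
  | nil => intro b c h; exact h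
  | cons a t ih => intro b c h; exact ih _ _ (hstep _ _ _ h)

theorem pvRel_out {a : Option String × Option Int × Option Int} {b : Option ((Int × Int) × String)}
    (h : pvRel a b) : a.1 = b.map Prod.snd := by
  rcases h with ⟨ha, hb⟩ | ⟨p, dd, ii, ha, hb⟩ <;> rw [ha, hb] <;> rfl

theorem pvLoops_eq (d : PySem.Dict String Int) (P : List Int) (hP : P ≠ []) (new : List String) :
    (new.foldl
      (fun (st : Option String × Option Int × Option Int) path =>
        match d.get? path with
        | none => st
        | some old_index =>
          let distance := (PySem.List.min? (P.map (fun q => |old_index - q|)) (fun y => y)).getD 0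
          match st with
          | (_, none, _) => (some path, some distance, some old_index)
          | (bp, some bd, bio) =>
            if distance < bd ∨ (distance = bd ∧ old_index < bio.getD 0) then
              (some path, some distance, some old_index)
            else (bp, some bd, bio))
      (none, none, none)).1
    = (new.foldl
      (fun (best : Option ((Int × Int) × String)) path =>
        match d.get? path with
        | none => best
        | some old_index =>
          let lo := pvBisect (PySem.List.sorted P (fun x => x) false) old_index 0 (PySem.List.sorted P (fun x => x) false).length
          let distance :=
            if lo < (PySem.List.sorted P (fun x => x) false).length then
              let d0 := (PySem.List.sorted P (fun x => x) false).getD lo 0 - old_index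
              if 0 < lo then min d0 (old_index - (PySem.List.sorted P (fun x => x) false).getD (lo - 1) 0) else d0
            else old_index - (PySem.List.sorted P (fun x => x) false).getD (lo - 1) 0
          match best with
          | none => some ((distance, old_index), path)
          | some (bk, bp) =>
            if distance < bk.1 ∨ (distance = bk.1 ∧ old_index < bk.2) then
              some ((distance, old_index), path)
            else some (bk, bp))
      none).map (fun kp => kp.2) := by
  rw [show (fun (kp : (Int × Int) × String) => kp.2) = Prod.snd from rfl]
  refine pvRel_out ?_
  refine pvFoldl_rel pvRel _ _ ?_ new (none, none, none) none (Or.inl ⟨rfl, rfl⟩)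
  intro a b path hab
  simp only []
  cases hdp : d.get? path with
  | none => exact hab
  | some oi =>
    simp only []
    rw [pvDist_eq P hP oi]
    rcases hab with ⟨ha, hb⟩ | ⟨p, dd, ii, ha, hb⟩
    · subst ha; subst hb
      exact Or.inr ⟨path, _, oi, rfl, rfl⟩
    · subst ha; subst hb
      simp only [Option.getD_some]
      by_cases hc : (PySem.List.min? (P.map (fun q => |oi - q|)) (fun y => y)).getD 0 < dd ∨
          ((PySem.List.min? (P.map (fun q => |oi - q|)) (fun y => y)).getD 0 = dd ∧ oi < ii)
      · rw [if_pos hc, if_pos hc]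
        exact Or.inr ⟨path, _, oi, rfl, rfl⟩
      · rw [if_neg hc, if_neg hc]
        exact Or.inr ⟨p, dd, ii, rfl, rfl⟩

-- ===== VERDICT (by name: the statement is the Claim_ definition above) =====
theorem pick_filter_fallback_target_path_py_spec : Claim_equal_pick_filter_fallback_target_path_py := by
  intro prev old new _
  unfold Spec_pick_filter_fallback_target_path_py pick_filter_fallback_target_path_py pick_filter_fallback_target_path_py_alt
  by_cases h0 : prev = [] ∨ new = []
  · rw [if_pos h0, if_pos h0]
  · rw [if_neg h0, if_neg h0]
    simp only []
    set d := (PySem.List.enumerate old 0).foldl (fun d ip => d.insert ip.2 ip.1) PySem.Dict.empty with hd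
    set P := (prev.filter (fun p => d.contains p)).map (fun p => (d.get? p).getD 0) with hPdef
    by_cases hP : P = []
    · rw [if_pos hP, if_pos ((PySem.List.sorted_eq_nil_iff ..).mpr hP)]
    · rw [if_neg hP, if_neg (fun h => hP ((PySem.List.sorted_eq_nil_iff ..).mp h))]
      exact pvLoops_eq d P hP new
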